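-- pv_equiv track=rewrite | github.com/sentinel-hub/digital-twin-of-news | dton-wildfires-cleaner/processing/fis_utils.py | get_closest_good_segment
-- ===== SOURCE A (Python) =====
-- def get_closest_good_segment(ind, n_year_segments, diffs):
--     # Gets closest segment with average or above average value in preceding years
--     best_val = -9999
--     best_ind = None
--     for i in range(ind, 0, -n_year_segments):
--         if diffs[i] > 0:
--             return i
--         if diffs[i] > best_val:
--             best_val = diffs[i]
--             best_ind = i
--     return best_ind
-- ===== SOURCE B (Python) =====
-- NO_DATA = -9999  # segments with a diff at or below this carry no usable signal
--
-- def get_closest_good_segment(ind, n_year_segments, diffs):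
--     # Gets closest segment with average or above average value in preceding years
--     candidates = [i for i in range(ind, 0, -n_year_segments) if diffs[i] > NO_DATA]
--     for i in candidates:
--         if diffs[i] > 0:
--             return i
--     return max(candidates, key=lambda i: diffs[i], default=None)
-- ===== Notes on version B (the rewrite author's own statement) =====
-- stated objective: idiomatic
-- what changed: replaces the single sentinel-tracking early-exit loop with a declarative pipeline: filter the strided index range to usable (> -9999) segments once, scan that list for the first positive diff, else return the builtin max(candidates, key=lambda i: diffs[i], default=None)
import Mathlib
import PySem

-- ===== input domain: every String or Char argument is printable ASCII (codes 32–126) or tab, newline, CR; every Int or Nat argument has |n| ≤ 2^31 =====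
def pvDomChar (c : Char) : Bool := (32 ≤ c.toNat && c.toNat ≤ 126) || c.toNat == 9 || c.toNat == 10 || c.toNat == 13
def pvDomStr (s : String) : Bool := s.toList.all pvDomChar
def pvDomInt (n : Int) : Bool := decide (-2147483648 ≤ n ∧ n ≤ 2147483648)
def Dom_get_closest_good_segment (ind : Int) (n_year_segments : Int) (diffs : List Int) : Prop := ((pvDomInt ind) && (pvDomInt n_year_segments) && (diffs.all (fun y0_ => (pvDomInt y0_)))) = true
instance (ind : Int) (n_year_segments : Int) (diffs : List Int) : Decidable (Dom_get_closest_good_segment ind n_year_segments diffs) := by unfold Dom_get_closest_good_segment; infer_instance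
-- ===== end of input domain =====

-- B: declarative rewrite — filter the strided range to usable (> -9999) segments once, scan for the first positive diff, else builtin max with default None; same cost as A.


-- ===== PORT A =====
-- the for-loop of A: state (best_val, best_ind), early return on diffs[i] > 0.
-- pyGet? = Python diffs[i] (negative index from the end); its `none` case is an IndexError, excluded by Pre_.
def goA (diffs : List Int) : List Int → Int → Option Int → Option Int
  | [], _, best_ind => best_ind
  | i :: rest, best_val, best_ind =>
    match PySem.List.pyGet? diffs i with
    | none => none   -- IndexError; outside Pre_
    | some d =>
      if d > 0 then some i
      else if d > best_val then goA diffs rest d (some i)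
      else goA diffs rest best_val best_ind

def get_closest_good_segment (ind : Int) (n_year_segments : Int) (diffs : List Int) : Option Int :=
  goA diffs (PySem.List.pyRange ind 0 (-n_year_segments)) (-9999) none

-- ===== PORT B =====
-- Source B's comprehension [i for i in idx if diffs[i] > NO_DATA]; its `none` case is the comprehension's IndexError, excluded by Pre_
def bCand (diffs : List Int) : List Int → Option (List Int)
  | [] => some []
  | i :: rest =>
    match PySem.List.pyGet? diffs i with
    | none => none   -- IndexError; outside Pre_
    | some d =>
      match bCand diffs rest with
      | none => none
      | some c => some (if d > -9999 then i :: c else c)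

-- Source B's first loop: first i in candidates with diffs[i] > 0 (every candidate index is in range)
def bFirstPos (diffs : List Int) : List Int → Option Int
  | [] => none
  | i :: rest =>
    match PySem.List.pyGet? diffs i with
    | none => none
    | some d => if d > 0 then some i else bFirstPos diffs rest

-- the key lambda i: diffs[i] of Source B's max(); total stand-in (Pre_ guarantees every candidate index is in range, where it IS diffs[i])
def bKey (diffs : List Int) (i : Int) : Int := (PySem.List.pyGet? diffs i).getD 0

def get_closest_good_segment_alt (ind : Int) (n_year_segments : Int) (diffs : List Int) : Option Int :=
  match bCand diffs (PySem.List.pyRange ind 0 (-n_year_segments)) with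
  | none => none   -- IndexError; outside Pre_
  | some candidates =>
    match bFirstPos diffs candidates with
    | some i => some i
    | none => PySem.List.max? candidates (bKey diffs)   -- max(…, default=None): max? [] = none

-- ===== PRECONDITION & SPEC =====
-- Pre_ excludes exactly the inputs where Python A raises: step 0 (ValueError) and an index of the range
-- outside [-len(diffs), len(diffs)) (IndexError). A returns on every other input.
def Pre_get_closest_good_segment (ind : Int) (n_year_segments : Int) (diffs : List Int) : Prop :=
  n_year_segments ≠ 0 ∧
  (0 < n_year_segments → 1 ≤ ind → ind < (diffs.length : Int)) ∧
  (n_year_segments < 0 → ind < 0 → -(diffs.length : Int) ≤ ind)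
instance (ind : Int) (n_year_segments : Int) (diffs : List Int) : Decidable (Pre_get_closest_good_segment ind n_year_segments diffs) := by unfold Pre_get_closest_good_segment; infer_instance

def pvWitness_get_closest_good_segment : Int × Int × List Int := (2, 1, [5, -1, 3])

def Spec_get_closest_good_segment (ind : Int) (n_year_segments : Int) (diffs : List Int) (out : Option Int) : Prop := out = get_closest_good_segment_alt ind n_year_segments diffs
instance (ind : Int) (n_year_segments : Int) (diffs : List Int) (out : Option Int) : Decidable (Spec_get_closest_good_segment ind n_year_segments diffs out) := by unfold Spec_get_closest_good_segment; infer_instance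

-- ===== CLAIM (what is proved, stated in full; the proofs are below) =====
def Claim_equal_get_closest_good_segment : Prop := ∀ (ind : Int) (n_year_segments : Int) (diffs : List Int), Dom_get_closest_good_segment ind n_year_segments diffs → Pre_get_closest_good_segment ind n_year_segments diffs → Spec_get_closest_good_segment ind n_year_segments diffs (get_closest_good_segment ind n_year_segments diffs)

-- ===== LEMMAS AND PROOFS =====

-- bounds of the members of a negative-step range (positive step is PySem.List.mem_pyRange_iff_of_pos)
lemma mem_pyRange_neg_bounds {a b s : Int} (hs : s < 0) {x : Int}
    (hx : x ∈ PySem.List.pyRange a b s) : b < x ∧ x ≤ a := by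
  simp only [PySem.List.pyRange, if_neg (by omega : ¬ s = 0), if_neg (by omega : ¬ 0 < s),
    List.mem_map, List.mem_range] at hx
  obtain ⟨k, hk, rfl⟩ := hx
  by_cases hba : b < a
  · simp only [if_pos hba] at hk
    have h1 : ((a - b + -s - 1) / (-s)) * (-s) ≤ a - b + -s - 1 := Int.ediv_mul_le _ (by omega)
    have h2 : (k : Int) < (a - b + -s - 1) / (-s) := by
      have := Int.toNat_of_nonneg (Int.ediv_nonneg (by omega) (by omega) :
        (0:Int) ≤ (a - b + -s - 1) / (-s))
      omega
    have h3 : ((k : Int) + 1) * (-s) ≤ ((a - b + -s - 1) / (-s)) * (-s) := by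
      apply mul_le_mul_of_nonneg_right _ (by omega)
      omega
    constructor <;> nlinarith [Int.natCast_nonneg k]
  · simp [if_neg hba] at hk

-- Pre_'s arithmetic bounds put every index of the strided range in range of diffs
lemma pre_bounds (ind n_year_segments : Int) (diffs : List Int)
    (h : Pre_get_closest_good_segment ind n_year_segments diffs) :
    ∀ i ∈ PySem.List.pyRange ind 0 (-n_year_segments), PySem.Raise.InRange diffs.length i := by
  obtain ⟨hn, hpos, hneg⟩ := h
  intro i hi
  by_cases hc : 0 < -n_year_segments
  · obtain ⟨h1, h2, -⟩ := (PySem.List.mem_pyRange_iff_of_pos hc i).mp hi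
    have hind := hneg (by omega) (by omega)
    exact ⟨by omega, by omega⟩
  · obtain ⟨h1, h2⟩ := mem_pyRange_neg_bounds (by omega) hi
    have hind := hpos (by omega) (by omega)
    exact ⟨by omega, by omega⟩

-- the usable-segment test of Source B's comprehension, as a Bool predicate on an index
def usable (diffs : List Int) (i : Int) : Bool := -9999 < bKey diffs i

-- the foldl step of PySem.List.max?
def maxStep (key : Int → Int) (acc : Option Int) (x : Int) : Option Int :=
  match acc with
  | none => some x
  | some m => if key m < key x then some x else some m

-- A's loop once the early-exit branch is split off: pure first-strict-max tracking over key values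
def goM (key : Int → Int) : List Int → Int → Option Int → Option Int
  | [], _, bi => bi
  | i :: rest, bv, bi => if key i > bv then goM key rest (key i) (some i) else goM key rest bv bi

-- an in-range index yields a value
lemma pyGet?_isSome (diffs : List Int) (i : Int) (h : PySem.Raise.InRange diffs.length i) :
    ∃ d, PySem.List.pyGet? diffs i = some d := by
  cases hg : PySem.List.pyGet? diffs i with
  | none => exact absurd h ((PySem.List.pyGet?_eq_none_iff diffs i).mp hg)
  | some d => exact ⟨d, rfl⟩

-- Step 1: under in-range indices, A's loop = first-positive scan, else keyed max tracking
lemma goA_split (diffs : List Int) (l : List Int)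
    (h : ∀ i ∈ l, PySem.Raise.InRange diffs.length i) (bv : Int) (bi : Option Int) :
    goA diffs l bv bi =
      match bFirstPos diffs l with
      | some i => some i
      | none => goM (bKey diffs) l bv bi := by
  induction l generalizing bv bi with
  | nil => rfl
  | cons i rest ih =>
    have hrest : ∀ j ∈ rest, PySem.Raise.InRange diffs.length j := fun j hj => h j (by simp [hj])
    obtain ⟨d, hd⟩ := pyGet?_isSome diffs i (h i (by simp))
    have hkey : bKey diffs i = d := by simp [bKey, hd]
    simp only [goA, bFirstPos, goM, hd, hkey]
    by_cases hpos : d > 0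
    · simp [hpos]
    · by_cases hbv : d > bv
      · simp [hpos, hbv, ih hrest]
      · simp [hpos, hbv, ih hrest]

-- max? as a foldl of maxStep
lemma max?_eq_foldl (key : Int → Int) (t : List Int) :
    PySem.List.max? t key = t.foldl (maxStep key) none := by
  simp only [PySem.List.max?]
  congr 1
  funext acc x
  cases acc <;> rfl

-- Step 2: under in-range indices, Source B's comprehension keeps exactly the usable indices
lemma bCand_eq_filter (diffs : List Int) (l : List Int)
    (h : ∀ i ∈ l, PySem.Raise.InRange diffs.length i) :
    bCand diffs l = some (l.filter (usable diffs)) := by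
  induction l with
  | nil => rfl
  | cons i rest ih =>
    obtain ⟨d, hd⟩ := pyGet?_isSome diffs i (h i (by simp))
    have hkey : bKey diffs i = d := by simp [bKey, hd]
    simp only [bCand, hd, ih (fun j hj => h j (by simp [hj])), List.filter_cons, usable, hkey]
    by_cases hu : d > -9999
    · simp [hu]
    · simp [hu]

-- Step 3: the first-positive scan ignores the unusable (≤ -9999) indices
lemma bFirstPos_filter (diffs : List Int) (l : List Int)
    (h : ∀ i ∈ l, PySem.Raise.InRange diffs.length i) :
    bFirstPos diffs (l.filter (usable diffs)) = bFirstPos diffs l := by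
  induction l with
  | nil => rfl
  | cons i rest ih =>
    obtain ⟨d, hd⟩ := pyGet?_isSome diffs i (h i (by simp))
    have hkey : bKey diffs i = d := by simp [bKey, hd]
    have ih' := ih (fun j hj => h j (by simp [hj]))
    simp only [List.filter_cons, usable, hkey]
    by_cases hu : (-9999 : Int) < d
    · simp [hu, bFirstPos, hd, ih']
    · have hnpos : ¬ d > 0 := by omega
      simp [hu, bFirstPos, hd, hnpos, ih']

-- a realised accumulator that passes the usability floor absorbs the unusable indices:
-- A's max tracking from (key j, some j) = the max? fold of the filtered list from (some j)
lemma goM_filter_seeded (key : Int → Int) (t : List Int) (j : Int) (hj : -9999 < key j) :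
    goM key t (key j) (some j) =
      (t.filter (fun i => -9999 < key i)).foldl (maxStep key) (some j) := by
  induction t generalizing j with
  | nil => rfl
  | cons x t ih =>
    by_cases hx : -9999 < key x
    · by_cases hcmp : key x > key j
      · rw [show goM key (x :: t) (key j) (some j) = goM key t (key x) (some x) by
          simp [goM, hcmp], ih x hx]
        simp [hx, maxStep, show key j < key x by omega]
      · rw [show goM key (x :: t) (key j) (some j) = goM key t (key j) (some j) by
          simp [goM, hcmp], ih j hj]
        simp [hx, maxStep, show ¬ key j < key x by omega]
    · rw [show goM key (x :: t) (key j) (some j) = goM key t (key j) (some j) by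
        simp [goM, show ¬ key x > key j by omega], ih j hj]
      simp [hx]

-- Step 4: A's sentinel-tracking loop from the initial state = the max? fold of the filtered list
lemma goM_sentinel_filter (key : Int → Int) (l : List Int) :
    goM key l (-9999) none =
      (l.filter (fun i => -9999 < key i)).foldl (maxStep key) none := by
  induction l with
  | nil => rfl
  | cons i t ih =>
    by_cases hi : -9999 < key i
    · rw [show goM key (i :: t) (-9999) none = goM key t (key i) (some i) by
        simp [goM, show key i > -9999 by omega], goM_filter_seeded key t i hi]
      simp [hi, maxStep]
    · rw [show goM key (i :: t) (-9999) none = goM key t (-9999) none by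
        simp [goM, show ¬ key i > -9999 by omega], ih]
      simp [hi]

-- the two spellings of the usability predicate agree
lemma filter_usable_eq (diffs : List Int) (l : List Int) :
    l.filter (usable diffs) = l.filter (fun i => -9999 < bKey diffs i) := rfl

-- ===== VERDICT (by name: the statement is the Claim_ definition above) =====
theorem get_closest_good_segment_spec : Claim_equal_get_closest_good_segment := by
  intro ind n diffs _ hpre
  unfold Spec_get_closest_good_segment get_closest_good_segment get_closest_good_segment_alt
  have hr := pre_bounds ind n diffs hpre
  rw [goA_split diffs _ hr, bCand_eq_filter diffs _ hr]
  dsimp only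
  rw [bFirstPos_filter diffs _ hr, goM_sentinel_filter, max?_eq_foldl, filter_usable_eq]
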